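-- pv_equiv track=rewrite | github.com/vrush1588/illumilearn | backend/main.py | get_cover_prompt
-- ===== SOURCE A (Python) =====
-- TARGET_AGE  = "6-12"
--
-- def get_cover_prompt(topic: str) -> str:
--
--     topic_lower = topic.lower()
--
--     if any(w in topic_lower for w in ["math", "number", "algebra", "geometry"]):
--         theme = "colorful numbers, geometric shapes, calculator, math symbols"
--
--     elif any(w in topic_lower for w in ["science", "chemistry", "atom", "lab"]):
--         theme = "bubbling test tubes, atoms, microscope, colorful reactions"
--
--     elif any(w in topic_lower for w in ["space", "planet", "star", "galaxy", "rocket"]):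
--         theme = "colorful planets, stars, rocket ship, astronaut in space"
--
--     elif any(w in topic_lower for w in ["animal", "nature", "forest", "ocean"]):
--         theme = "friendly animals in colorful nature, trees, flowers"
--
--     elif any(w in topic_lower for w in ["history", "ancient", "egypt", "rome"]):
--         theme = "ancient ruins, historical maps, scrolls, timeline"
--
--     elif any(w in topic_lower for w in ["computer", "coding", "robot", "ai"]):
--         theme = "friendly robot, glowing computer, colorful code, circuits"
--
--     elif any(w in topic_lower for w in ["volcano", "earthquake", "weather", "earth"]):
--         theme = "dramatic volcano, colorful earth layers, weather patterns"
--
--     elif any(w in topic_lower for w in ["body", "human", "biology", "heart", "brain"]):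
--         theme = "colorful human body, heart, brain, cells"
--
--     else:
--         theme = f"magical educational world about {topic}, colorful and exciting"
--
--     return f"""
-- Children's book cover about {topic}.
-- Theme: {theme}.
-- Bright watercolor cartoon style.
-- Child friendly ages {TARGET_AGE}.
-- No text in image.
-- """
-- ===== SOURCE B (Python) =====
-- TARGET_AGE = "6-12"
--
-- THEMES = [
--     "colorful numbers, geometric shapes, calculator, math symbols",
--     "bubbling test tubes, atoms, microscope, colorful reactions",
--     "colorful planets, stars, rocket ship, astronaut in space",
--     "friendly animals in colorful nature, trees, flowers",
--     "ancient ruins, historical maps, scrolls, timeline",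
--     "friendly robot, glowing computer, colorful code, circuits",
--     "dramatic volcano, colorful earth layers, weather patterns",
--     "colorful human body, heart, brain, cells",
-- ]
--
-- # inverted index: keyword -> priority (index into THEMES)
-- KEYWORD_PRIORITY = [
--     ("math", 0), ("number", 0), ("algebra", 0), ("geometry", 0),
--     ("science", 1), ("chemistry", 1), ("atom", 1), ("lab", 1),
--     ("space", 2), ("planet", 2), ("star", 2), ("galaxy", 2), ("rocket", 2),
--     ("animal", 3), ("nature", 3), ("forest", 3), ("ocean", 3),
--     ("history", 4), ("ancient", 4), ("egypt", 4), ("rome", 4),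
--     ("computer", 5), ("coding", 5), ("robot", 5), ("ai", 5),
--     ("volcano", 6), ("earthquake", 6), ("weather", 6), ("earth", 6),
--     ("body", 7), ("human", 7), ("biology", 7), ("heart", 7), ("brain", 7),
-- ]
--
-- def get_cover_prompt(topic: str) -> str:
--     topic_lower = topic.lower()
--     i = min((g for w, g in KEYWORD_PRIORITY if w in topic_lower), default=None)
--     theme = THEMES[i] if i is not None else f"magical educational world about {topic}, colorful and exciting"
--     return f"""
-- Children's book cover about {topic}.
-- Theme: {theme}.
-- Bright watercolor cartoon style.
-- Child friendly ages {TARGET_AGE}.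
-- No text in image.
-- """
-- ===== Notes on version B (the rewrite author's own statement) =====
-- stated objective: alternative
-- what changed: Replaced the ordered first-match if/elif cascade by an inverted keyword-to-priority index: one pass collects the priorities of ALL matching keywords and the theme of the minimum priority is selected (min with default=None), with no break/first-match control flow.
import Mathlib
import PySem

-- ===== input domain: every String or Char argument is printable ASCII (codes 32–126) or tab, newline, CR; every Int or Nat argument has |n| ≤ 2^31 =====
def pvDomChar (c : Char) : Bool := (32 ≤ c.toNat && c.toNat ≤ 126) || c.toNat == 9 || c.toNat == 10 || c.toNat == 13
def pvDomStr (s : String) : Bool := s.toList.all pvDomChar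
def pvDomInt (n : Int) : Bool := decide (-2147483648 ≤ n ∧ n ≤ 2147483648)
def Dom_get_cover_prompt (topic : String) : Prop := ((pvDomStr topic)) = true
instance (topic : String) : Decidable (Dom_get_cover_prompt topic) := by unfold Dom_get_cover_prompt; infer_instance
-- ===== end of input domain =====

-- B replaces A's first-match if/elif cascade by an inverted keyword→priority index:
-- all matching keywords' priorities are collected in one pass and the minimum selects the theme (alternative; same cost).

def TARGET_AGE : String := "6-12"

-- ===== PORT A =====
def get_cover_prompt (topic : String) : String :=
  let topic_lower := PySem.Str.lower topic
  let theme :=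
    if ["math", "number", "algebra", "geometry"].any (fun w => PySem.Str.isIn w topic_lower) then
      "colorful numbers, geometric shapes, calculator, math symbols"
    else if ["science", "chemistry", "atom", "lab"].any (fun w => PySem.Str.isIn w topic_lower) then
      "bubbling test tubes, atoms, microscope, colorful reactions"
    else if ["space", "planet", "star", "galaxy", "rocket"].any (fun w => PySem.Str.isIn w topic_lower) then
      "colorful planets, stars, rocket ship, astronaut in space"
    else if ["animal", "nature", "forest", "ocean"].any (fun w => PySem.Str.isIn w topic_lower) then
      "friendly animals in colorful nature, trees, flowers"
    else if ["history", "ancient", "egypt", "rome"].any (fun w => PySem.Str.isIn w topic_lower) then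
      "ancient ruins, historical maps, scrolls, timeline"
    else if ["computer", "coding", "robot", "ai"].any (fun w => PySem.Str.isIn w topic_lower) then
      "friendly robot, glowing computer, colorful code, circuits"
    else if ["volcano", "earthquake", "weather", "earth"].any (fun w => PySem.Str.isIn w topic_lower) then
      "dramatic volcano, colorful earth layers, weather patterns"
    else if ["body", "human", "biology", "heart", "brain"].any (fun w => PySem.Str.isIn w topic_lower) then
      "colorful human body, heart, brain, cells"
    else
      "magical educational world about " ++ topic ++ ", colorful and exciting"
  "\nChildren's book cover about " ++ topic ++ ".\nTheme: " ++ theme ++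
    ".\nBright watercolor cartoon style.\nChild friendly ages " ++ TARGET_AGE ++
    ".\nNo text in image.\n"

-- ===== PORT B =====
def THEMES : List String :=
  [ "colorful numbers, geometric shapes, calculator, math symbols",
    "bubbling test tubes, atoms, microscope, colorful reactions",
    "colorful planets, stars, rocket ship, astronaut in space",
    "friendly animals in colorful nature, trees, flowers",
    "ancient ruins, historical maps, scrolls, timeline",
    "friendly robot, glowing computer, colorful code, circuits",
    "dramatic volcano, colorful earth layers, weather patterns",
    "colorful human body, heart, brain, cells" ]

-- inverted index: keyword -> priority (index into THEMES)
def KEYWORD_PRIORITY : List (String × Nat) :=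
  [ ("math", 0), ("number", 0), ("algebra", 0), ("geometry", 0),
    ("science", 1), ("chemistry", 1), ("atom", 1), ("lab", 1),
    ("space", 2), ("planet", 2), ("star", 2), ("galaxy", 2), ("rocket", 2),
    ("animal", 3), ("nature", 3), ("forest", 3), ("ocean", 3),
    ("history", 4), ("ancient", 4), ("egypt", 4), ("rome", 4),
    ("computer", 5), ("coding", 5), ("robot", 5), ("ai", 5),
    ("volcano", 6), ("earthquake", 6), ("weather", 6), ("earth", 6),
    ("body", 7), ("human", 7), ("biology", 7), ("heart", 7), ("brain", 7) ]

def get_cover_prompt_alt (topic : String) : String :=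
  let topic_lower := PySem.Str.lower topic
  -- min((g for w, g in KEYWORD_PRIORITY if w in topic_lower), default=None)
  let i? := PySem.List.min?
      ((KEYWORD_PRIORITY.filter (fun p => PySem.Str.isIn p.1 topic_lower)).map Prod.snd)
      (fun x => x)
  let theme :=
    match i? with
    | some i => THEMES.getD i ""   -- THEMES[i]; i < THEMES.length always, so getD is exact here
    | none => "magical educational world about " ++ topic ++ ", colorful and exciting"
  "\nChildren's book cover about " ++ topic ++ ".\nTheme: " ++ theme ++
    ".\nBright watercolor cartoon style.\nChild friendly ages " ++ TARGET_AGE ++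
    ".\nNo text in image.\n"

-- ===== PRECONDITION & SPEC =====
def Spec_get_cover_prompt (topic : String) (out : String) : Prop := out = get_cover_prompt_alt topic
instance (topic : String) (out : String) : Decidable (Spec_get_cover_prompt topic out) := by unfold Spec_get_cover_prompt; infer_instance

-- ===== CLAIM =====
def Claim_equal_get_cover_prompt : Prop := ∀ (topic : String), Dom_get_cover_prompt topic → Spec_get_cover_prompt topic (get_cover_prompt topic)

-- ===== LEMMAS AND PROOFS =====

def pvGrp (ws : List String) (j : Nat) : List (String × Nat) := ws.map (fun w => (w, j))

lemma pvFilt_grp (tl : String) (ws : List String) (j : Nat) :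
    ((pvGrp ws j).filter (fun p => PySem.Str.isIn p.1 tl)).map Prod.snd =
      List.replicate (ws.filter (fun w => PySem.Str.isIn w tl)).length j := by
  induction ws with
  | nil => rfl
  | cons a t ih =>
      simp only [pvGrp, List.map_cons, List.filter_cons, PySem.Str.isIn] at ih ⊢
      by_cases h : PySem.Chars.isIn a.toList tl.toList = true
      · simp [h, ih, List.replicate_succ]
      · simp only [Bool.not_eq_true] at h
        simp [h, ih]

lemma pvFilter_nil (tl : String) (ws : List String)
    (h : ¬ ws.any (fun w => PySem.Str.isIn w tl) = true) :
    ws.filter (fun w => PySem.Str.isIn w tl) = [] := by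
  rw [List.filter_eq_nil_iff]
  intro w hw hc
  exact h (List.any_eq_true.mpr ⟨w, hw, hc⟩)

lemma pvMin_first (i : Nat) (f rest : List Nat)
    (hf : ∀ x ∈ f, x = i) (hr : ∀ x ∈ rest, i < x) (hne : f ≠ []) :
    PySem.List.min? (f ++ rest) (fun x => x) = some i := by
  cases h : PySem.List.min? (f ++ rest) (fun x => x) with
  | none =>
      have : f ++ rest = [] := (PySem.List.min?_eq_none_iff _ _).mp h
      rcases f with _ | ⟨a, t⟩
      · exact absurd rfl hne
      · simp at this
  | some m =>
      have hmem : m ∈ f ++ rest := PySem.List.min?_mem h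
      have hi : i ∈ f ++ rest := by
        rcases f with _ | ⟨a, t⟩
        · exact absurd rfl hne
        · have : a = i := hf a (by simp)
          simp [this]
      have hle : m ≤ i := PySem.List.min?_isMin h i hi
      rcases List.mem_append.mp hmem with hmf | hmr
      · exact congrArg some (hf m hmf)
      · exact absurd hle (Nat.not_le.mpr (hr m hmr))

lemma pvMin_grp (tl : String) (ws : List String) (i : Nat) (rest : List Nat)
    (hi : ws.any (fun w => PySem.Str.isIn w tl) = true)
    (hr : ∀ x ∈ rest, i < x) :
    PySem.List.min?
        (List.replicate (ws.filter (fun w => PySem.Str.isIn w tl)).length i ++ rest) (fun x => x) =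
      some i := by
  apply pvMin_first
  · exact fun x hx => List.eq_of_mem_replicate hx
  · exact hr
  · intro hnil
    rw [List.replicate_eq_nil_iff, List.length_eq_zero_iff, List.filter_eq_nil_iff] at hnil
    obtain ⟨w, hw, hm⟩ := List.any_eq_true.mp hi
    exact hnil w hw (by simpa using hm)


def pvGroups : List (List String) :=
  [ ["math", "number", "algebra", "geometry"],
    ["science", "chemistry", "atom", "lab"],
    ["space", "planet", "star", "galaxy", "rocket"],
    ["animal", "nature", "forest", "ocean"],
    ["history", "ancient", "egypt", "rome"],
    ["computer", "coding", "robot", "ai"],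
    ["volcano", "earthquake", "weather", "earth"],
    ["body", "human", "biology", "heart", "brain"] ]

-- the per-group index lists, concatenated
def pvIdx (tl : String) : List (List String) → Nat → List Nat
  | [], _ => []
  | ws :: rest, k =>
      List.replicate (ws.filter (fun w => PySem.Str.isIn w tl)).length k ++ pvIdx tl rest (k + 1)

def pvFlat : List (List String) → Nat → List (String × Nat)
  | [], _ => []
  | ws :: rest, k => pvGrp ws k ++ pvFlat rest (k + 1)

-- the cascade: index of the first group with a matching keyword
def pvFirst (tl : String) : List (List String) → Nat → Option Nat
  | [], _ => none
  | ws :: rest, k =>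
      if ws.any (fun w => PySem.Str.isIn w tl) = true then some k else pvFirst tl rest (k + 1)

lemma pvFilt_flat (tl : String) (gs : List (List String)) (k : Nat) :
    ((pvFlat gs k).filter (fun p => PySem.Str.isIn p.1 tl)).map Prod.snd = pvIdx tl gs k := by
  induction gs generalizing k with
  | nil => rfl
  | cons ws rest ih =>
      simp only [pvFlat, pvIdx, List.filter_append, List.map_append, pvFilt_grp, ih]

lemma pvIdx_ge (tl : String) (gs : List (List String)) (k : Nat) :
    ∀ x ∈ pvIdx tl gs k, k ≤ x := by
  induction gs generalizing k with
  | nil => simp [pvIdx]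
  | cons ws rest ih =>
      intro x hx
      rcases List.mem_append.mp hx with h | h
      · exact le_of_eq (List.eq_of_mem_replicate h).symm
      · exact Nat.le_of_succ_le (ih (k + 1) x h)

-- minimum of the concatenated index lists = first matching group
lemma pvMin_idx (tl : String) (gs : List (List String)) (k : Nat) :
    PySem.List.min? (pvIdx tl gs k) (fun x => x) = pvFirst tl gs k := by
  induction gs generalizing k with
  | nil => rfl
  | cons ws rest ih =>
      simp only [pvIdx, pvFirst]
      by_cases h : ws.any (fun w => PySem.Str.isIn w tl) = true
      · rw [if_pos h]
        exact pvMin_grp tl ws k _ h (fun x hx => Nat.lt_of_succ_le (pvIdx_ge tl rest (k + 1) x hx))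
      · rw [if_neg h, pvFilter_nil tl ws h]
        simp only [List.length_nil, List.replicate_zero, List.nil_append]
        exact ih (k + 1)

-- the minimum matching priority equals the cascade's first-match choice
lemma pvMin_key (tl : String) :
    PySem.List.min?
        ((KEYWORD_PRIORITY.filter (fun p => PySem.Str.isIn p.1 tl)).map Prod.snd) (fun x => x) =
      (if ["math", "number", "algebra", "geometry"].any (fun w => PySem.Str.isIn w tl) then some 0
       else if ["science", "chemistry", "atom", "lab"].any (fun w => PySem.Str.isIn w tl) then some 1
       else if ["space", "planet", "star", "galaxy", "rocket"].any (fun w => PySem.Str.isIn w tl) then some 2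
       else if ["animal", "nature", "forest", "ocean"].any (fun w => PySem.Str.isIn w tl) then some 3
       else if ["history", "ancient", "egypt", "rome"].any (fun w => PySem.Str.isIn w tl) then some 4
       else if ["computer", "coding", "robot", "ai"].any (fun w => PySem.Str.isIn w tl) then some 5
       else if ["volcano", "earthquake", "weather", "earth"].any (fun w => PySem.Str.isIn w tl) then some 6
       else if ["body", "human", "biology", "heart", "brain"].any (fun w => PySem.Str.isIn w tl) then some 7
       else none) := by
  have hidx : (KEYWORD_PRIORITY.filter (fun p => PySem.Str.isIn p.1 tl)).map Prod.snd =
      pvIdx tl pvGroups 0 := by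
    rw [show KEYWORD_PRIORITY = pvFlat pvGroups 0 from rfl]
    exact pvFilt_flat tl pvGroups 0
  rw [hidx, pvMin_idx]
  rfl

-- ===== VERDICT =====
theorem get_cover_prompt_spec : Claim_equal_get_cover_prompt := by
  intro topic _
  simp only [Spec_get_cover_prompt, get_cover_prompt, get_cover_prompt_alt]
  rw [pvMin_key]
  split_ifs <;> rfl
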